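-- pv_equiv track=rewrite | github.com/BhuwanChhimal/CSIT-Department | Plagiarism-Checker/app.py | make_ngram_counts
-- ===== SOURCE A (Python) =====
-- import math
-- from collections import Counter
--
-- STOPWORDS = {
--     "a",
--     "an",
--     "and",
--     "are",
--     "as",
--     "at",
--     "be",
--     "but",
--     "by",
--     "for",
--     "from",
--     "has",
--     "have",
--     "he",
--     "in",
--     "is",
--     "it",
--     "its",
--     "of",
--     "on",
--     "or",
--     "that",
--     "the",
--     "their",
--     "there",
--     "these",
--     "this",
--     "to",
--     "was",
--     "were",
--     "will",
--     "with",
--     "you",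
--     "your",
-- }
--
-- def informative_count(tokens: list[str]) -> int:
--     return sum(1 for token in tokens if len(token) > 1 and token not in STOPWORDS)
--
-- def make_ngram_counts(tokens: list[str], size: int, excluded: set[str] | None = None) -> Counter[str]:
--     excluded = excluded or set()
--     phrases: Counter[str] = Counter()
--     for index in range(len(tokens) - size + 1):
--         phrase_tokens = tokens[index:index + size]
--         if informative_count(phrase_tokens) < math.ceil(size / 2):
--             continue
--         phrase = " ".join(phrase_tokens)
--         if phrase in excluded:
--             continue
--         phrases[phrase] += 1
--     return phrases
-- ===== SOURCE B (Python) =====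
-- import math
-- from collections import Counter
--
-- STOPWORDS = {
--     "a", "an", "and", "are", "as", "at", "be", "but", "by", "for", "from",
--     "has", "have", "he", "in", "is", "it", "its", "of", "on", "or", "that",
--     "the", "their", "there", "these", "this", "to", "was", "were", "will",
--     "with", "you", "your",
-- }
--
-- def make_ngram_counts(tokens, size, excluded=None):
--     excluded = excluded or set()
--     phrases = Counter()
--     if size < 0:
--         # negative n-gram sizes make no sense: no n-grams
--         return phrases
--     # prefix sums of the informativeness indicator: no per-window recount
--     pref = [0]
--     acc = 0
--     for token in tokens:
--         acc += 1 if len(token) > 1 and token not in STOPWORDS else 0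
--         pref.append(acc)
--     need = -(-size // 2)  # ceil(size/2), integer arithmetic
--     for index in range(len(tokens) - size + 1):
--         if pref[index + size] - pref[index] < need:
--             continue
--         phrase = " ".join(tokens[index:index + size])
--         if phrase in excluded:
--             continue
--         phrases[phrase] += 1
--     return phrases
-- ===== Notes on version B (the rewrite author's own statement) =====
-- stated objective: alternative
-- what changed: Replaces the per-window informative_count rescan with a precomputed 0/1 indicator and prefix-sum array, so each window's informativeness test is a constant-time subtraction, and computes ceil(size/2) in integer arithmetic; B returns an empty Counter for negative sizes.
-- intended difference: On size < 0 A returns phrases manufactured by Python's negative-slice arithmetic (e.g. Counter({'': 2}) on ([], -1, None)); B returns the empty Counter, the intended value since no n-gram of negative size exists. — e.g. on make_ngram_counts([], -1, none): A returns [("", 2)], B returns []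
import Mathlib
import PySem

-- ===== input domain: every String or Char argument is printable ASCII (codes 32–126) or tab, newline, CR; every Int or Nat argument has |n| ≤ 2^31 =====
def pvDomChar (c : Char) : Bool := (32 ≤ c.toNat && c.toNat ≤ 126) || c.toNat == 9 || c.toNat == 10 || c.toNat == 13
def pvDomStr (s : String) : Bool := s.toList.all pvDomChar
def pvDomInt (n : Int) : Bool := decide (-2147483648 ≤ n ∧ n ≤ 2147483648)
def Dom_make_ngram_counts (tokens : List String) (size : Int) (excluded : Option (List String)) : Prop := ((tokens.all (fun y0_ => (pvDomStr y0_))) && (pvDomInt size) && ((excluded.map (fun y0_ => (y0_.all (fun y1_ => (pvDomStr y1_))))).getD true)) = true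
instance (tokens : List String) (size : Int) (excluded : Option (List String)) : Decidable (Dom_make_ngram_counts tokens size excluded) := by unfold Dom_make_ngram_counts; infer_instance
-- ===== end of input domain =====

-- ===== PORT A =====
-- B replaces the per-window informative recount by a prefix-sum array; on negative
-- sizes A returns accidental phrases from Python negative-slice arithmetic while B
-- returns the empty counter (stated as D_ below).
def pvSTOPWORDS : PySem.Set String := PySem.Set.ofList
  ["a", "an", "and", "are", "as", "at", "be", "but", "by", "for", "from",
   "has", "have", "he", "in", "is", "it", "its", "of", "on", "or", "that",
   "the", "their", "there", "these", "this", "to", "was", "were", "will",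
   "with", "you", "your"]

-- 'len(token) > 1 and token not in STOPWORDS' (shared by both sources verbatim)
def pvInformative (t : String) : Bool :=
  decide (1 < PySem.Str.len t) && !(pvSTOPWORDS.contains t)

-- sum(1 for token in tokens if len(token) > 1 and token not in STOPWORDS)
def informative_count (tokens : List String) : Int :=
  (tokens.map (fun t => if pvInformative t then (1 : Int) else 0)).sum

def make_ngram_counts (tokens : List String) (size : Int) (excluded : Option (List String)) : List (String × Int) :=
  let exc := excluded.getD []          -- 'excluded or set()'
  let phrases : PySem.Dict String Int := PySem.Dict.empty
  let phrases := (PySem.List.pyRange 0 ((tokens.length : Int) - size + 1) 1).foldl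
    (fun phrases index =>
      let phrase_tokens := PySem.List.slice tokens (some index) (some (index + size))
      -- math.ceil(size/2) = -((-size) // 2), exact for |size| ≤ 2^31
      if informative_count phrase_tokens < -(PySem.Int.floordiv (-size) 2) then phrases
      else
        let phrase := PySem.Str.join " " phrase_tokens
        if exc.contains phrase then phrases
        else phrases.insert phrase (phrases.getD phrase 0 + 1)) phrases
  phrases.items

-- ===== PORT B =====
-- pref = [0]; acc = 0; for token in tokens: acc += 1 if informative else 0; pref.append(acc)
def pvPref (acc : Int) (ts : List String) : List Int :=
  match ts with
  | [] => [acc]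
  | t :: rest => acc :: pvPref (acc + (if pvInformative t then 1 else 0)) rest

def make_ngram_counts_alt (tokens : List String) (size : Int) (excluded : Option (List String)) : List (String × Int) :=
  let exc := excluded.getD []
  let phrases : PySem.Dict String Int := PySem.Dict.empty
  if size < 0 then phrases.items
  else
    let pref := pvPref 0 tokens
    let need := -(PySem.Int.floordiv (-size) 2)   -- -(-size // 2) = ceil(size/2)
    let phrases := (PySem.List.pyRange 0 ((tokens.length : Int) - size + 1) 1).foldl
      (fun phrases index =>
        if PySem.List.pyGetD pref (index + size) 0 - PySem.List.pyGetD pref index 0 < need then phrases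
        else
          let phrase := PySem.Str.join " " (PySem.List.slice tokens (some index) (some (index + size)))
          if exc.contains phrase then phrases
          else phrases.insert phrase (phrases.getD phrase 0 + 1)) phrases
    phrases.items

-- ===== PRECONDITION & SPEC =====
-- On size < 0 A returns phrases manufactured by Python's negative-slice arithmetic
-- (e.g. {'': 2} on ([], -1)); B returns the empty counter, the intended value since
-- no n-gram of negative size exists.
def D_make_ngram_counts (tokens : List String) (size : Int) (excluded : Option (List String)) : Prop := size < 0
instance (tokens : List String) (size : Int) (excluded : Option (List String)) : Decidable (D_make_ngram_counts tokens size excluded) := by unfold D_make_ngram_counts; infer_instance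

def Spec_make_ngram_counts (tokens : List String) (size : Int) (excluded : Option (List String)) (out : List (String × Int)) : Prop := ¬ D_make_ngram_counts tokens size excluded → out = make_ngram_counts_alt tokens size excluded
instance (tokens : List String) (size : Int) (excluded : Option (List String)) (out : List (String × Int)) : Decidable (Spec_make_ngram_counts tokens size excluded out) := by unfold Spec_make_ngram_counts; infer_instance

def pvDiffWitness_make_ngram_counts : List String × Int × Option (List String) := ([], -1, none)
def pvDiffWitnessOut_make_ngram_counts : (List (String × Int)) × (List (String × Int)) := ([("", 2)], [])

-- ===== CLAIM (what is proved, stated in full; the proofs are below) =====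
def Claim_unchanged_make_ngram_counts : Prop := ∀ (tokens : List String) (size : Int) (excluded : Option (List String)), Dom_make_ngram_counts tokens size excluded → Spec_make_ngram_counts tokens size excluded (make_ngram_counts tokens size excluded)
def Claim_changed_make_ngram_counts : Prop := Dom_make_ngram_counts (pvDiffWitness_make_ngram_counts.1) (pvDiffWitness_make_ngram_counts.2.1) (pvDiffWitness_make_ngram_counts.2.2) ∧ D_make_ngram_counts (pvDiffWitness_make_ngram_counts.1) (pvDiffWitness_make_ngram_counts.2.1) (pvDiffWitness_make_ngram_counts.2.2) ∧ make_ngram_counts (pvDiffWitness_make_ngram_counts.1) (pvDiffWitness_make_ngram_counts.2.1) (pvDiffWitness_make_ngram_counts.2.2) = pvDiffWitnessOut_make_ngram_counts.1 ∧ make_ngram_counts_alt (pvDiffWitness_make_ngram_counts.1) (pvDiffWitness_make_ngram_counts.2.1) (pvDiffWitness_make_ngram_counts.2.2) = pvDiffWitnessOut_make_ngram_counts.2 ∧ pvDiffWitnessOut_make_ngram_counts.1 ≠ pvDiffWitnessOut_make_ngram_counts.2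

-- ===== LEMMAS AND PROOFS =====

-- pref[j] is acc plus the sum of the indicator over the first j tokens
theorem pvPref_getD (ts : List String) (acc : Int) (j : Nat) (hj : j ≤ ts.length) :
    (pvPref acc ts).getD j 0 = acc + ((ts.take j).map (fun t => if pvInformative t then (1 : Int) else 0)).sum := by
  induction ts generalizing acc j with
  | nil =>
      have : j = 0 := by simpa using hj
      subst this; simp [pvPref]
  | cons t rest ih =>
      cases j with
      | zero => simp [pvPref]
      | succ j =>
          simp only [pvPref, List.getD_cons_succ, List.take_succ_cons, List.map_cons, List.sum_cons]
          rw [ih _ _ (by simpa using hj)]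
          ring

-- the prefix-sum window test equals A's per-window recount
theorem window_eq (tokens : List String) (k s : Nat) (hks : k + s ≤ tokens.length) :
    PySem.List.pyGetD (pvPref 0 tokens) ((k : Int) + (s : Int)) 0 - PySem.List.pyGetD (pvPref 0 tokens) (k : Int) 0
      = informative_count ((tokens.drop k).take s) := by
  have hcast : (k : Int) + (s : Int) = ((k + s : Nat) : Int) := by push_cast; ring
  rw [hcast, PySem.List.pyGetD_natCast, PySem.List.pyGetD_natCast]
  rw [pvPref_getD _ _ _ (by omega), pvPref_getD _ _ _ (by omega)]
  rw [List.take_add, List.map_append, List.sum_append]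
  simp [informative_count]

theorem make_ngram_counts_spec : Claim_unchanged_make_ngram_counts := by
  intro tokens size excluded _ hD
  unfold D_make_ngram_counts at hD
  have hsize : 0 ≤ size := by omega
  unfold make_ngram_counts make_ngram_counts_alt
  rw [if_neg (by omega)]
  obtain ⟨s, rfl⟩ : ∃ s : Nat, size = (s : Int) := ⟨size.toNat, by omega⟩
  simp only []
  congr 1
  apply PySem.List.foldl_congr_mem
  intro d i hi
  rw [PySem.List.mem_pyRange_one] at hi
  obtain ⟨k, rfl⟩ : ∃ k : Nat, i = (k : Int) := ⟨i.toNat, by omega⟩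
  have hks : k + s ≤ tokens.length := by omega
  rw [window_eq tokens k s hks, PySem.List.slice_natCast_add]

-- ===== VERDICT (by name: the statement is the Claim_ definition above) =====
theorem make_ngram_counts_changed : Claim_changed_make_ngram_counts := by
  unfold Claim_changed_make_ngram_counts; decide
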